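-- pv_equiv track=rewrite | github.com/marbl/anianns | src/anianns/parse_dotplot.py | merge_coordinates
-- ===== SOURCE A (Python) =====
-- def merge_coordinates(data):
--     """
--     Merges coordinates and keeps the entry with the highest count if two entries share the same x or y axis.
--
--     Parameters:
--     data (Counter): A Counter object with tuples of (x, y) as keys and counts as values.
--
--     Returns:
--     list: A list of tuples with merged coordinates and their counts.
--     """
--     # Filter out entries with count <= 3
--     filtered_data = [(key, count) for key, count in data.items() if count > 3]
--
--     # Sort by y coordinate, then by count (descending)
--     filtered_data.sort(key=lambda item: (item[0][1], -item[1]))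
--
--     result = []
--     seen_y = set()
--     for (x, y), count in filtered_data:
--         # If y already exists, skip this entry (as the highest count for this y is already added)
--         if y not in seen_y:
--             result.append(((x, y), count))
--             seen_y.add(y)
--
--     # Now process for x axis
--     result.sort(
--         key=lambda item: (item[0][0], -item[1])
--     )  # Sort by x, then by count (descending)
--     final_result = []
--     seen_x = set()
--     for (x, y), count in result:
--         # If x already exists, skip this entry (as the highest count for this x is already added)
--         if x not in seen_x:
--             final_result.append(((x, y), count))
--             seen_x.add(x)
--
--     # Sort the final result by x-coordinate for better readability
--     final_result.sort(key=lambda item: item[0][0])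
--     return final_result
-- ===== SOURCE B (Python) =====
-- def merge_coordinates(data):
--     """Same result as A: keep, per y then per x, the highest-count entry
--     (count > 3 only), returned sorted by x.  Instead of sort-then-first-seen
--     dedup passes, accumulate the best entry per key in a dict, replacing only
--     on a strictly greater count."""
--     best_y = {}
--     for key, count in data.items():
--         if count > 3:
--             y = key[1]
--             if y not in best_y:
--                 best_y[y] = (key, count)
--             elif count > best_y[y][1]:
--                 best_y[y] = (key, count)
--     best_x = {}
--     for item in sorted(best_y.values(), key=lambda it: it[0][1]):
--         x = item[0][0]
--         if x not in best_x:
--             best_x[x] = item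
--         elif item[1] > best_x[x][1]:
--             best_x[x] = item
--     return sorted(best_x.values(), key=lambda it: it[0][0])
-- ===== Notes on version B (the rewrite author's own statement) =====
-- stated objective: alternative
-- what changed: Replaces A's two sort-then-first-seen-dedup passes with dict accumulation (best entry per y, then per x, replaced only on a strictly greater count), sorting only the already-deduplicated values.
import Mathlib
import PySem

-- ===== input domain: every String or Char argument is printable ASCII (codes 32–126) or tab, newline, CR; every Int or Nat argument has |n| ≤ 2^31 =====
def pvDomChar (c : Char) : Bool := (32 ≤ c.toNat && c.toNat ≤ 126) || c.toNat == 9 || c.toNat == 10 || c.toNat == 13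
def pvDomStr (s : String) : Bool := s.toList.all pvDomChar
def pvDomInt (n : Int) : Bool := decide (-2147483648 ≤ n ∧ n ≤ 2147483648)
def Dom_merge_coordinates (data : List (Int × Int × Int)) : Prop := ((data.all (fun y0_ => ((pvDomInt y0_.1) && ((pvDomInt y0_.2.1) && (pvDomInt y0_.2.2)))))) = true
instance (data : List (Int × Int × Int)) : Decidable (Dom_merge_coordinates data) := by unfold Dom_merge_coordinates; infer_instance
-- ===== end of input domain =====

-- B replaces A's two sort-then-first-seen-dedup passes by dict accumulation (best entry
-- per y, then per x, replaced only on a strictly greater count), sorting only the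
-- already-deduplicated values.

-- ===== PORT A =====
def merge_coordinates (data : List (Int × Int × Int)) : List ((Int × Int) × Int) :=
  -- filtered_data = [(key, count) for key, count in data.items() if count > 3]
  let filtered0 := (data.filter (fun t => t.2.2 > 3)).map (fun t => ((t.1, t.2.1), t.2.2))
  -- filtered_data.sort(key=lambda item: (item[0][1], -item[1]))
  let filtered_data := PySem.List.sorted2 filtered0 (fun it => it.1.2) (fun it => -it.2) false
  -- result/seen_y loop
  let st := filtered_data.foldl
    (fun (st : List ((Int × Int) × Int) × PySem.Set Int) it =>
      if !(PySem.Set.contains st.2 it.1.2) then (st.1 ++ [it], PySem.Set.add st.2 it.1.2) else st)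
    ([], PySem.Set.empty)
  -- result.sort(key=lambda item: (item[0][0], -item[1]))
  let result := PySem.List.sorted2 st.1 (fun it => it.1.1) (fun it => -it.2) false
  -- final_result/seen_x loop
  let st2 := result.foldl
    (fun (st : List ((Int × Int) × Int) × PySem.Set Int) it =>
      if !(PySem.Set.contains st.2 it.1.1) then (st.1 ++ [it], PySem.Set.add st.2 it.1.1) else st)
    ([], PySem.Set.empty)
  -- final_result.sort(key=lambda item: item[0][0])
  PySem.List.sorted st2.1 (fun it => it.1.1) false

-- ===== PORT B =====
def merge_coordinates_alt (data : List (Int × Int × Int)) : List ((Int × Int) × Int) :=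
  let best_y := data.foldl
    (fun (d : PySem.Dict Int ((Int × Int) × Int)) t =>
      if t.2.2 > (3:Int) then
        match d.get? t.2.1 with
        | none => d.insert t.2.1 ((t.1, t.2.1), t.2.2)
        | some old => if t.2.2 > old.2 then d.insert t.2.1 ((t.1, t.2.1), t.2.2) else d
      else d) PySem.Dict.empty
  let best_x := (PySem.List.sorted best_y.values (fun it => it.1.2) false).foldl
    (fun (d : PySem.Dict Int ((Int × Int) × Int)) it =>
      match d.get? it.1.1 with
      | none => d.insert it.1.1 it
      | some old => if it.2 > old.2 then d.insert it.1.1 it else d) PySem.Dict.empty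
  PySem.List.sorted best_x.values (fun it => it.1.1) false

-- ===== PRECONDITION & SPEC =====
def Spec_merge_coordinates (data : List (Int × Int × Int)) (out : List ((Int × Int) × Int)) : Prop := out = merge_coordinates_alt data
instance (data : List (Int × Int × Int)) (out : List ((Int × Int) × Int)) : Decidable (Spec_merge_coordinates data out) := by unfold Spec_merge_coordinates; infer_instance

-- ===== CLAIM (what is proved, stated in full; the proofs are below) =====
def Claim_equal_merge_coordinates : Prop := ∀ (data : List (Int × Int × Int)), Dom_merge_coordinates data → Spec_merge_coordinates data (merge_coordinates data)

-- ===== LEMMAS AND PROOFS =====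

-- entry type abbreviation for the proofs
abbrev PvE := (Int × Int) × Int

-- the strict 'before' relation of A's stable sorts: lexicographic on (key, -count)
def pvBefore (k : PvE → Int) (a b : PvE) : Bool :=
  decide (k a < k b) || (!decide (k b < k a) && decide (-a.2 < -b.2))

-- first-seen dedup on the key, as a structural recursion (= A's result/seen loops)
def pvDedup (k : PvE → Int) : List PvE → PySem.Set Int → List PvE
  | [], _ => []
  | e :: t, seen =>
      if PySem.Set.contains seen (k e) then pvDedup k t seen
      else e :: pvDedup k t (PySem.Set.add seen (k e))

-- one strict-max replacement step (= B's dict update on one key class)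
lemma pvDedup_cons_pos {k : PvE → Int} {e : PvE} {t : List PvE} {seen : PySem.Set Int}
    (hc : PySem.Set.contains seen (k e) = true) :
    pvDedup k (e :: t) seen = pvDedup k t seen := by
  simp only [pvDedup]; rw [if_pos hc]

lemma pvDedup_cons_neg {k : PvE → Int} {e : PvE} {t : List PvE} {seen : PySem.Set Int}
    (hc : PySem.Set.contains seen (k e) = false) :
    pvDedup k (e :: t) seen = e :: pvDedup k t (PySem.Set.add seen (k e)) := by
  simp only [pvDedup]; rw [if_neg (by rw [hc]; exact Bool.false_ne_true)]

def pvBest (o : Option PvE) (e : PvE) : Option PvE :=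
  match o with
  | none => some e
  | some old => if e.2 > old.2 then some e else some old

-- first maximal-count element of l with key k0, in l's order
def pvBestOf (k : PvE → Int) (l : List PvE) (k0 : Int) : Option PvE :=
  l.foldl (fun o e => if k e = k0 then pvBest o e else o) none

-- B's dict-accumulation pass over a prepared entry list
def pvFoldD (k : PvE → Int) (l : List PvE) (d : PySem.Dict Int PvE) : PySem.Dict Int PvE :=
  l.foldl (fun d e =>
    match d.get? (k e) with
    | none => d.insert (k e) e
    | some old => if e.2 > old.2 then d.insert (k e) e else d) d

def pvSortedBy (k : PvE → Int) (ys : List PvE) : Prop :=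
  List.Pairwise (fun a b => pvBefore k b a = false) ys

lemma pvBefore_true {k : PvE → Int} {a b : PvE} :
    pvBefore k a b = true ↔ (k a < k b ∨ (¬ k b < k a ∧ b.2 < a.2)) := by
  simp only [pvBefore, Bool.or_eq_true, Bool.and_eq_true, Bool.not_eq_true', decide_eq_true_eq,
    decide_eq_false_iff_not]
  omega

lemma pvBefore_false {k : PvE → Int} {a b : PvE} :
    pvBefore k a b = false ↔ (¬ k a < k b ∧ (k b < k a ∨ a.2 ≤ b.2)) := by
  rw [← Bool.not_eq_true, pvBefore_true]; omega

lemma pvBefore_asymm {k : PvE → Int} {a b : PvE} (h : pvBefore k a b = true) :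
    pvBefore k b a = false := by
  rw [pvBefore_true] at h; rw [pvBefore_false]; omega

lemma pvBefore_trans_false {k : PvE → Int} {x y z : PvE}
    (h1 : pvBefore k x y = true) (h2 : pvBefore k z y = false) : pvBefore k z x = false := by
  rw [pvBefore_true] at h1; rw [pvBefore_false] at h2 ⊢; omega

lemma pv_insertBy_sorted {k : PvE → Int} (x : PvE) (ys : List PvE) (h : pvSortedBy k ys) :
    pvSortedBy k (PySem.List.insertBy (pvBefore k) x ys) := by
  induction ys with
  | nil => simp [PySem.List.insertBy, pvSortedBy]
  | cons y t ih =>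
    unfold pvSortedBy at h ⊢
    rw [List.pairwise_cons] at h
    obtain ⟨hy, ht⟩ := h
    by_cases hb : pvBefore k x y = true
    · rw [show PySem.List.insertBy (pvBefore k) x (y :: t) = x :: y :: t by
        simp [PySem.List.insertBy, hb]]
      refine List.pairwise_cons.mpr ⟨?_, List.pairwise_cons.mpr ⟨hy, ht⟩⟩
      intro z hz
      rcases List.mem_cons.mp hz with rfl | hz
      · exact pvBefore_asymm hb
      · exact pvBefore_trans_false hb (hy z hz)
    · rw [show PySem.List.insertBy (pvBefore k) x (y :: t)
          = y :: PySem.List.insertBy (pvBefore k) x t by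
        simp [PySem.List.insertBy, hb]]
      refine List.pairwise_cons.mpr ⟨?_, ih ht⟩
      intro z hz
      rcases (PySem.List.mem_insertBy _ _ _ _).mp hz with rfl | hz
      · exact Bool.not_eq_true _ ▸ hb
      · exact hy z hz

lemma pv_sorted2_eq_foldl (l : List PvE) (k : PvE → Int) :
    PySem.List.sorted2 l k (fun e => -e.2) false
      = l.foldl (fun acc x => PySem.List.insertBy (pvBefore k) x acc) [] := by
  rfl

lemma pv_foldl_insertBy_sortedBy (l : List PvE) (k : PvE → Int) (acc : List PvE)
    (h : pvSortedBy k acc) :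
    pvSortedBy k (l.foldl (fun acc x => PySem.List.insertBy (pvBefore k) x acc) acc) := by
  induction l generalizing acc with
  | nil => exact h
  | cons e t ih => exact ih _ (pv_insertBy_sorted e acc h)

lemma pv_sorted2_sortedBy (l : List PvE) (k : PvE → Int) :
    pvSortedBy k (PySem.List.sorted2 l k (fun e => -e.2) false) := by
  rw [pv_sorted2_eq_foldl]
  exact pv_foldl_insertBy_sortedBy l k [] (List.Pairwise.nil)

lemma pv_find?_insertBy_neg {p : PvE → Bool} {x : PvE} (b : PvE → PvE → Bool) (ys : List PvE)
    (hx : p x = false) :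
    List.find? p (PySem.List.insertBy b x ys) = List.find? p ys := by
  induction ys with
  | nil => simp [PySem.List.insertBy, hx]
  | cons y t ih =>
    by_cases hb : b x y = true
    · simp [PySem.List.insertBy, hb, List.find?_cons, hx]
    · simp only [PySem.List.insertBy, Bool.not_eq_true] at hb ⊢
      rw [show (if b x y = true then x :: y :: t
            else y :: PySem.List.insertBy b x t) = y :: PySem.List.insertBy b x t by simp [hb]]
      simp [List.find?_cons, ih]

lemma pv_find?_insertBy_key {k : PvE → Int} {x : PvE} {k0 : Int} (ys : List PvE)
    (h : pvSortedBy k ys) (hx : k x = k0) :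
    List.find? (fun e => decide (k e = k0)) (PySem.List.insertBy (pvBefore k) x ys)
      = pvBest (List.find? (fun e => decide (k e = k0)) ys) x := by
  induction ys with
  | nil => simp [PySem.List.insertBy, hx, pvBest]
  | cons y t ih =>
    unfold pvSortedBy at h
    rw [List.pairwise_cons] at h
    obtain ⟨hy, ht⟩ := h
    by_cases hb : pvBefore k x y = true
    · rw [show PySem.List.insertBy (pvBefore k) x (y :: t) = x :: y :: t by
        simp [PySem.List.insertBy, hb]]
      rw [List.find?_cons_of_pos (by simp [hx])]
      by_cases hyk : k y = k0
      · rw [List.find?_cons_of_pos (by simp [hyk])]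
        rw [pvBefore_true] at hb
        have : y.2 < x.2 := by omega
        simp [pvBest, this]
      · have hterm : List.find? (fun e => decide (k e = k0)) (y :: t) = none := by
          rw [List.find?_eq_none]
          intro z hz
          rcases List.mem_cons.mp hz with rfl | hz
          · simp [hyk]
          · have := hy z hz
            rw [pvBefore_false] at this
            rw [pvBefore_true] at hb
            simp only [decide_eq_true_eq]
            omega
        rw [hterm]; simp [pvBest]
    · rw [show PySem.List.insertBy (pvBefore k) x (y :: t)
          = y :: PySem.List.insertBy (pvBefore k) x t by
        simp [PySem.List.insertBy, hb]]
      by_cases hyk : k y = k0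
      · rw [List.find?_cons_of_pos (by simp [hyk]), List.find?_cons_of_pos (by simp [hyk])]
        rw [Bool.not_eq_true] at hb
        rw [pvBefore_false] at hb
        have : ¬ x.2 > y.2 := by omega
        simp [pvBest, this]
      · rw [List.find?_cons_of_neg (by simp [hyk]), List.find?_cons_of_neg (by simp [hyk])]
        exact ih ht

lemma pv_find?_sorted2 (l : List PvE) (k : PvE → Int) (k0 : Int) :
    List.find? (fun e => decide (k e = k0)) (PySem.List.sorted2 l k (fun e => -e.2) false)
      = pvBestOf k l k0 := by
  rw [pv_sorted2_eq_foldl]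
  unfold pvBestOf
  induction l using List.reverseRecOn with
  | nil => simp
  | append_singleton l x ih =>
    rw [List.foldl_append, List.foldl_append]
    simp only [List.foldl_cons, List.foldl_nil]
    by_cases hx : k x = k0
    · rw [pv_find?_insertBy_key _ (by
        rw [← pv_sorted2_eq_foldl]; exact pv_sorted2_sortedBy l k) hx]
      rw [ih, if_pos hx]
    · rw [pv_find?_insertBy_neg _ _ (by simp [hx])]
      rw [ih, if_neg hx]

lemma pv_contains_iff {seen : PySem.Set Int} {v : Int} :
    PySem.Set.contains seen v = true ↔ v ∈ seen := by
  simp [PySem.Set.contains]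

lemma pv_contains_add {seen : PySem.Set Int} {y v : Int} :
    PySem.Set.contains (PySem.Set.add seen y) v = (PySem.Set.contains seen v || v == y) := by
  have hmem : PySem.Set.contains (PySem.Set.add seen y) v = true ↔ (v ∈ seen ∨ v = y) := by
    rw [pv_contains_iff]; exact PySem.Set.mem_add seen y v
  rcases Bool.eq_false_or_eq_true (PySem.Set.contains seen v || v == y) with h | h <;> rw [h]
  · rw [hmem]
    simp only [Bool.or_eq_true, beq_iff_eq, pv_contains_iff] at h
    exact h
  · rw [← Bool.not_eq_true, hmem]
    rcases Bool.or_eq_false_iff.mp h with ⟨h1, h2⟩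
    rw [← Bool.not_eq_true, pv_contains_iff] at h1
    simp only [beq_eq_false_iff_ne, ne_eq] at h2
    tauto

lemma pv_mem_pvDedup {k : PvE → Int} (s : List PvE) (seen : PySem.Set Int) (e : PvE) :
    e ∈ pvDedup k s seen
      ↔ (PySem.Set.contains seen (k e) = false
          ∧ List.find? (fun z => decide (k z = k e)) s = some e) := by
  induction s generalizing seen with
  | nil => simp [pvDedup]
  | cons e0 t ih =>
    by_cases hc : PySem.Set.contains seen (k e0) = true
    · rw [pvDedup_cons_pos hc]
      by_cases hk : k e0 = k e
      · constructor
        · intro hm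
          have := (ih seen).mp hm
          rw [← hk] at this
          rw [this.1] at hc; cases hc
        · rintro ⟨h1, -⟩; rw [← hk] at h1; rw [h1] at hc; cases hc
      · rw [List.find?_cons_of_neg (by simp [hk]), ih]
    · rw [Bool.not_eq_true] at hc
      rw [pvDedup_cons_neg hc]
      by_cases hk : k e0 = k e
      · rw [List.find?_cons_of_pos (by simp [hk])]
        constructor
        · intro hm
          rcases List.mem_cons.mp hm with rfl | hm
          · exact ⟨hc, rfl⟩
          · have := (ih _).mp hm
            rw [pv_contains_add, hk] at this
            simp at this
        · rintro ⟨-, h2⟩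
          exact List.mem_cons.mpr (Or.inl (Option.some.inj h2).symm)
        
      · rw [List.find?_cons_of_neg (by simp [hk])]
        constructor
        · intro hm
          rcases List.mem_cons.mp hm with rfl | hm
          · exact absurd rfl hk
          · have := (ih _).mp hm
            rw [pv_contains_add] at this
            rcases Bool.or_eq_false_iff.mp this.1 with ⟨h1, -⟩
            exact ⟨h1, this.2⟩
        · rintro ⟨h1, h2⟩
          refine List.mem_cons.mpr (Or.inr ((ih _).mpr ⟨?_, h2⟩))
          rw [pv_contains_add, h1]
          simp only [Bool.false_or, beq_eq_false_iff_ne, ne_eq]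
          exact fun h => hk h.symm

lemma pv_mem_of_mem_pvDedup {k : PvE → Int} {s : List PvE} {seen : PySem.Set Int} {e : PvE}
    (h : e ∈ pvDedup k s seen) : e ∈ s := by
  induction s generalizing seen with
  | nil => simp [pvDedup] at h
  | cons e0 t ih =>
    by_cases hc : PySem.Set.contains seen (k e0) = true
    · rw [pvDedup_cons_pos hc] at h
      exact List.mem_cons.mpr (Or.inr (ih h))
    · rw [Bool.not_eq_true] at hc
      rw [pvDedup_cons_neg hc] at h
      rcases List.mem_cons.mp h with rfl | h
      · exact List.mem_cons_self
      · exact List.mem_cons.mpr (Or.inr (ih h))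

lemma pv_pvDedup_pairwise {k : PvE → Int} (s : List PvE) (seen : PySem.Set Int)
    (h : pvSortedBy k s) :
    List.Pairwise (fun a b => k a < k b) (pvDedup k s seen) := by
  induction s generalizing seen with
  | nil => simp [pvDedup]
  | cons e0 t ih =>
    unfold pvSortedBy at h
    rw [List.pairwise_cons] at h
    obtain ⟨he0, ht⟩ := h
    by_cases hc : PySem.Set.contains seen (k e0) = true
    · rw [pvDedup_cons_pos hc]
      exact ih seen ht
    · rw [Bool.not_eq_true] at hc
      rw [pvDedup_cons_neg hc]
      refine List.pairwise_cons.mpr ⟨?_, ih _ ht⟩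
      intro z hz
      have hzt : z ∈ t := pv_mem_of_mem_pvDedup hz
      have hzk := (pv_mem_pvDedup _ _ _).mp hz
      rw [pv_contains_add] at hzk
      rcases Bool.or_eq_false_iff.mp hzk.1 with ⟨-, hne⟩
      have hb := he0 z hzt
      rw [pvBefore_false] at hb
      simp only [beq_eq_false_iff_ne, ne_eq] at hne
      omega

lemma pv_loop_fst {k : PvE → Int} (s : List PvE) (acc : List PvE) (seen : PySem.Set Int) :
    (s.foldl
      (fun (st : List PvE × PySem.Set Int) it =>
        if !(PySem.Set.contains st.2 (k it)) then (st.1 ++ [it], PySem.Set.add st.2 (k it)) else st)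
      (acc, seen)).1 = acc ++ pvDedup k s seen := by
  induction s generalizing acc seen with
  | nil => simp [pvDedup]
  | cons e0 t ih =>
    rw [List.foldl_cons]
    by_cases hc : PySem.Set.contains seen (k e0) = true
    · rw [show (if !(PySem.Set.contains seen (k e0)) then (acc ++ [e0], PySem.Set.add seen (k e0))
          else (acc, seen)) = (acc, seen) by rw [hc]; simp]
      rw [ih, pvDedup_cons_pos hc]
    · rw [Bool.not_eq_true] at hc
      rw [show (if !(PySem.Set.contains seen (k e0)) then (acc ++ [e0], PySem.Set.add seen (k e0))
          else (acc, seen)) = (acc ++ [e0], PySem.Set.add seen (k e0)) by rw [hc]; simp]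
      rw [ih, pvDedup_cons_neg hc]
      simp

def pvInv (k : PvE → Int) (d : PySem.Dict Int PvE) : Prop :=
  d.keys.Nodup ∧ ∀ p ∈ d.items, p.1 = k p.2

lemma pv_step_get? (k : PvE → Int) (d : PySem.Dict Int PvE) (e : PvE) (k0 : Int) :
    (match d.get? (k e) with
      | none => d.insert (k e) e
      | some old => if e.2 > old.2 then d.insert (k e) e else d).get? k0
      = if k e = k0 then pvBest (d.get? k0) e else d.get? k0 := by
  by_cases hk : k e = k0
  · subst hk
    cases hg : d.get? (k e) with
    | none => simp [hg, pvBest]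
    | some old =>
      by_cases hgt : e.2 > old.2
      · simp [hg, hgt, pvBest]
      · simp [hg, hgt, pvBest]
  · rw [if_neg hk]
    cases hg : d.get? (k e) with
    | none =>
      simp only [hg]
      rw [PySem.Dict.get?_insert, if_neg (fun h => hk h.symm)]
    | some old =>
      simp only [hg]
      by_cases hgt : e.2 > old.2
      · rw [if_pos hgt, PySem.Dict.get?_insert, if_neg (fun h => hk h.symm)]
      · rw [if_neg hgt]

lemma pv_foldD_get? (k : PvE → Int) (l : List PvE) (d : PySem.Dict Int PvE) (k0 : Int) :
    (pvFoldD k l d).get? k0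
      = l.foldl (fun o e => if k e = k0 then pvBest o e else o) (d.get? k0) := by
  induction l generalizing d with
  | nil => rfl
  | cons e t ih =>
    unfold pvFoldD at ih ⊢
    rw [List.foldl_cons, List.foldl_cons, ih, pv_step_get?]

lemma pv_foldD_inv (k : PvE → Int) (l : List PvE) (d : PySem.Dict Int PvE) (h : pvInv k d) :
    pvInv k (pvFoldD k l d) := by
  induction l generalizing d with
  | nil => exact h
  | cons e t ih =>
    unfold pvFoldD at ih ⊢
    rw [List.foldl_cons]
    apply ih
    have hins : pvInv k (d.insert (k e) e) := by
      refine ⟨PySem.Dict.nodup_keys_insert _ _ _ h.1, ?_⟩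
      intro p hp
      rcases (PySem.Dict.mem_items_insert _ _ _ _).mp hp with rfl | ⟨hp, -⟩
      · rfl
      · exact h.2 p hp
    cases hg : d.get? (k e) with
    | none => exact hins
    | some old =>
      by_cases hgt : e.2 > old.2
      · simp only [hgt, if_true]; exact hins
      · simp only [hgt, if_false]; exact h

lemma pv_mem_values_iff {k : PvE → Int} {d : PySem.Dict Int PvE} (h : pvInv k d) (e : PvE) :
    e ∈ d.values ↔ d.get? (k e) = some e := by
  constructor
  · intro hm
    rcases List.mem_map.mp hm with ⟨p, hp, hpe⟩
    have h1 := h.2 p hp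
    have : p = (k e, e) := by
      rcases p with ⟨pk, pv⟩
      cases hpe
      simp only at h1
      rw [h1]
    rw [this] at hp
    exact PySem.Dict.get?_of_mem_items _ hp h.1
  · intro hg
    have := PySem.Dict.mem_items_of_get?_eq_some _ hg
    exact List.mem_map.mpr ⟨(k e, e), this, rfl⟩

lemma pv_values_nodup {k : PvE → Int} {d : PySem.Dict Int PvE} (h : pvInv k d) :
    d.values.Nodup := by
  have hmap : d.values.map k = d.keys := by
    show (d.items.map (fun p => p.2)).map k = d.items.map (fun p => p.1)
    rw [List.map_map]
    exact List.map_congr_left (fun p hp => (h.2 p hp).symm)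
  exact List.Nodup.of_map k (hmap ▸ h.1)

-- the central pass lemma: B's dict pass, sorted by the key, is A's sort-then-dedup pass
lemma pv_inv_empty (k : PvE → Int) : pvInv k (PySem.Dict.empty : PySem.Dict Int PvE) := by
  constructor
  · rw [PySem.Dict.keys_empty]; exact List.nodup_nil
  · intro p hp
    simp [PySem.Dict.empty] at hp

lemma pv_pass (k : PvE → Int) (l : List PvE) :
    PySem.List.sorted (pvFoldD k l PySem.Dict.empty).values k false
      = pvDedup k (PySem.List.sorted2 l k (fun e => -e.2) false) PySem.Set.empty := by
  have hinv := pv_foldD_inv k l PySem.Dict.empty (pv_inv_empty k)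
  have hpw := pv_pvDedup_pairwise (PySem.List.sorted2 l k (fun e => -e.2) false)
    PySem.Set.empty (pv_sorted2_sortedBy l k)
  apply PySem.List.sorted_eq_of_perm_of_pairwise_lt _ _ _ ?_ hpw
  rw [List.perm_ext_iff_of_nodup
    (hpw.imp (fun {a b} hlt => fun hab => absurd (hab ▸ hlt) (lt_irrefl _)))
    (pv_values_nodup hinv)]
  intro e
  rw [pv_mem_pvDedup, pv_find?_sorted2, pv_mem_values_iff hinv, pv_foldD_get?,
    PySem.Dict.get?_empty]
  have hc0 : PySem.Set.contains (PySem.Set.empty : PySem.Set Int) (k e) = false := rfl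
  rw [hc0]
  unfold pvBestOf
  simp

-- B's first loop over the raw items is the dict pass over A's filtered entry list
lemma pv_alt_first (data : List (Int × Int × Int)) :
    data.foldl
      (fun (d : PySem.Dict Int ((Int × Int) × Int)) t =>
        if t.2.2 > (3:Int) then
          match d.get? t.2.1 with
          | none => d.insert t.2.1 ((t.1, t.2.1), t.2.2)
          | some old => if t.2.2 > old.2 then d.insert t.2.1 ((t.1, t.2.1), t.2.2) else d
        else d) PySem.Dict.empty
      = pvFoldD (fun it => it.1.2)
          ((data.filter (fun t => t.2.2 > 3)).map (fun t => ((t.1, t.2.1), t.2.2)))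
          PySem.Dict.empty := by
  rw [PySem.List.foldl_ite_eq_foldl_filter (p := fun t : Int × Int × Int => t.2.2 > 3)]
  unfold pvFoldD
  rw [List.foldl_map]
  rfl

lemma pv_alt_second (l : List ((Int × Int) × Int)) :
    l.foldl
      (fun (d : PySem.Dict Int ((Int × Int) × Int)) it =>
        match d.get? it.1.1 with
        | none => d.insert it.1.1 it
        | some old => if it.2 > old.2 then d.insert it.1.1 it else d) PySem.Dict.empty
      = pvFoldD (fun it => it.1.1) l PySem.Dict.empty := rfl

-- ===== VERDICT (by name: the statement is the Claim_ definition above) =====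
theorem merge_coordinates_spec : Claim_equal_merge_coordinates := by
  intro data _
  unfold Spec_merge_coordinates merge_coordinates merge_coordinates_alt
  simp only [pv_alt_first, pv_alt_second, pv_loop_fst, List.nil_append, pv_pass]
  apply PySem.List.sorted_eq_self_of_pairwise
  exact (pv_pvDedup_pairwise (k := fun it => it.1.1) _ _
    (pv_sorted2_sortedBy _ (fun it => it.1.1))).imp (fun h => le_of_lt h)
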